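-- pv_equiv track=rewrite | github.com/probsys/fast-loaded-dice-roller-experiments | src/utils.py | frac_to_bits
-- ===== SOURCE A (Python) =====
-- def get_Zkl(k, l):
--     """Return Z for k-bit precision and prefix length l."""
--     assert 0 < k and 0 <= l <= k
--     return pow(2, k) - pow(2, l)*(l<k)
--
-- def encode_binary(x, width):
--     """Convert integer x to binary with at least width digits."""
--     assert isinstance(x, int)
--     xb = bin(x)[2:]
--     if width == 0:
--         assert x == 0
--         return ''
--     else:
--         assert len(xb) <= width
--         pad = width  - len(xb)
--         return '0' * pad + xb
--
-- def frac_to_bits(M, k, l):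
--     # Returns binary expansion of M / Zkl
--     assert 0 <= M < get_Zkl(k, l) or (k == 1 and l == 0)
--     if l == k:
--         x = M
--         y = 0
--     elif l == 0:
--         x = 0
--         y = M
--     else:
--         Zb = pow(2, k-l) - 1
--         x = M//Zb
--         y = M - Zb * x
--     a = encode_binary(x, l)
--     s = encode_binary(y, k-l)
--     b = a + s
--     return [int(i) for i in b]
-- ===== SOURCE B (Python) =====
-- def get_Zkl(k, l):
--     """Return Z for k-bit precision and prefix length l."""
--     assert 0 < k and 0 <= l <= k
--     return pow(2, k) - pow(2, l)*(l<k)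
--
-- def encode_binary(x, width):
--     """Convert integer x to binary with at least width digits."""
--     assert isinstance(x, int)
--     xb = bin(x)[2:]
--     if width == 0:
--         assert x == 0
--         return ''
--     else:
--         assert len(xb) <= width
--         pad = width  - len(xb)
--         return '0' * pad + xb
--
-- def frac_to_bits(M, k, l):
--     # Returns binary expansion of M / Zkl, as one k-bit encoding:
--     # the concatenation of the l-bit and (k-l)-bit parts equals the
--     # k-bit encoding of N = M + M // (2**(k-l) - 1).
--     assert 0 <= M < get_Zkl(k, l) or (k == 1 and l == 0)
--     if l == 0 or l == k:
--         N = M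
--     else:
--         N = M + M // (pow(2, k - l) - 1)
--     return [int(c) for c in encode_binary(N, k)]
-- ===== Notes on version B (the rewrite author's own statement) =====
-- stated objective: simpler
-- what changed: Instead of splitting M into quotient/remainder parts (x,y) and concatenating an l-bit and a (k-l)-bit encoding, B computes the single integer N = M + M//(2^(k-l)-1) (N = M when l==0 or l==k) and returns one k-bit encoding of N, using the identity that the two-part concatenation equals the k-bit encoding of N.
import Mathlib
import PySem

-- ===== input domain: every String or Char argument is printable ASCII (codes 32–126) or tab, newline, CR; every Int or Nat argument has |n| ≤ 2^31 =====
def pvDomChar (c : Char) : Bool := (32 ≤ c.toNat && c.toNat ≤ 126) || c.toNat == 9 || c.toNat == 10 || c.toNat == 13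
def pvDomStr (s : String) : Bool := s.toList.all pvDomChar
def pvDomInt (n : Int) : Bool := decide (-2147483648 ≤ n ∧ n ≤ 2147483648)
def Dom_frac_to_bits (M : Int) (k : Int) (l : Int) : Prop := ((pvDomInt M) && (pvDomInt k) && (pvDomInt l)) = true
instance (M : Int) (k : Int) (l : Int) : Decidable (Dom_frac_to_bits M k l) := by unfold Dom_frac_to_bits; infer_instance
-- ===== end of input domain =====

-- B replaces A's split of M into (x,y) and two-part encoding by one k-bit encoding of
-- the single integer N = M + M//(2^(k-l)-1); objective: simpler.

-- ===== PORT A =====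

-- bin(n)[2:] for n ≥ 1 (no leading zeros); empty for 0
def pvRawBits : Nat → List Char
  | 0 => []
  | n+1 => pvRawBits ((n+1)/2) ++ [if (n+1) % 2 = 1 then '1' else '0']
decreasing_by exact Nat.div_lt_self (Nat.succ_pos n) (by omega)

-- bin(x)[2:]; exact for x ≥ 0 (Pre_ guarantees every encoded value is ≥ 0)
def pvBin (n : Nat) : List Char := if n = 0 then ['0'] else pvRawBits n

-- encode_binary, asserts dropped (Pre_ excludes every input on which they fire)
def encode_binary (x : Int) (width : Int) : List Char :=
  let xb := pvBin x.toNat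
  if width = 0 then []
  else List.replicate (width - (xb.length : Int)).toNat '0' ++ xb

def frac_to_bits (M : Int) (k : Int) (l : Int) : List Int :=
  let xy : Int × Int :=
    if l = k then (M, 0)
    else if l = 0 then (0, M)
    else
      let Zb : Int := 2 ^ (k - l).toNat - 1
      let x := PySem.Int.floordiv M Zb
      (x, M - Zb * x)
  let a := encode_binary xy.1 l
  let s := encode_binary xy.2 (k - l)
  (a ++ s).map (fun c => ((c.toNat : Int) - 48))   -- int(i) on the digit chars '0'/'1'

-- ===== PORT B =====
def frac_to_bits_alt (M : Int) (k : Int) (l : Int) : List Int :=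
  let N : Int := if l = 0 ∨ l = k then M
                 else M + PySem.Int.floordiv M (2 ^ (k - l).toNat - 1)
  (encode_binary N k).map (fun c => ((c.toNat : Int) - 48))

-- ===== PRECONDITION & SPEC =====
-- Pre_ excludes exactly the inputs where A raises AssertionError (in get_Zkl, the top-level
-- assert, or encode_binary); the disjunct (k=1 ∧ l=0 ∧ M=1) is the one oversized-M input the
-- top-level assert's escape hatch lets through and encode_binary still accepts.
def Pre_frac_to_bits (M : Int) (k : Int) (l : Int) : Prop :=
  0 < k ∧ 0 ≤ l ∧ l ≤ k ∧ 0 ≤ M ∧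
    (M < 2 ^ k.toNat - (if l < k then 2 ^ l.toNat else 0) ∨ (k = 1 ∧ l = 0 ∧ M = 1))
instance (M : Int) (k : Int) (l : Int) : Decidable (Pre_frac_to_bits M k l) := by
  unfold Pre_frac_to_bits; infer_instance

def pvWitness_frac_to_bits : Int × Int × Int := (5, 4, 2)

def Spec_frac_to_bits (M : Int) (k : Int) (l : Int) (out : List Int) : Prop := out = frac_to_bits_alt M k l
instance (M : Int) (k : Int) (l : Int) (out : List Int) : Decidable (Spec_frac_to_bits M k l out) := by unfold Spec_frac_to_bits; infer_instance

-- ===== CLAIM (what is proved, stated in full; the proofs are below) =====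
def Claim_equal_frac_to_bits : Prop := ∀ (M : Int) (k : Int) (l : Int), Dom_frac_to_bits M k l → Pre_frac_to_bits M k l → Spec_frac_to_bits M k l (frac_to_bits M k l)

-- ===== LEMMAS AND PROOFS =====

-- canonical big-endian w-bit spelling of n (n mod 2^w)
def bitsBE : Nat → Nat → List Char
  | 0, _ => []
  | w+1, n => bitsBE w (n / 2) ++ [if n % 2 = 1 then '1' else '0']

lemma pvRawBits_zero : pvRawBits 0 = [] := by simp [pvRawBits]

lemma pvRawBits_succ (m : Nat) :
    pvRawBits (m+1) = pvRawBits ((m+1)/2) ++ [if (m+1) % 2 = 1 then '1' else '0'] := by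
  rw [pvRawBits]

lemma bitsBE_eq_pad : ∀ (w n : Nat), n < 2 ^ w →
    bitsBE w n = List.replicate (w - (pvRawBits n).length) '0' ++ pvRawBits n := by
  intro w
  induction w with
  | zero =>
      intro n hn
      interval_cases n
      simp [bitsBE, pvRawBits_zero]
  | succ w ih =>
      intro n hn
      rcases n with _ | m
      · rw [pvRawBits_zero]
        have h0 : ∀ v, bitsBE v 0 = List.replicate v '0' := by
          intro v
          induction v with
          | zero => simp [bitsBE]
          | succ v ihv => simpa [bitsBE, List.replicate_succ'] using ihv
        simpa using h0 (w+1)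
      · have hdiv : (m+1) / 2 < 2 ^ w :=
          (Nat.div_lt_iff_lt_mul (by omega)).mpr (by rw [pow_succ] at hn; omega)
        have := ih ((m+1)/2) hdiv
        rw [bitsBE, this, pvRawBits_succ, List.append_assoc]
        congr 1
        have hlen : (pvRawBits ((m+1)/2) ++ [if (m+1) % 2 = 1 then '1' else '0']).length
            = (pvRawBits ((m+1)/2)).length + 1 := by simp
        rw [hlen]
        congr 1
        omega

lemma rawbits_len_le : ∀ (w n : Nat), n < 2 ^ w → (pvRawBits n).length ≤ w := by
  intro w
  induction w with
  | zero => intro n hn; interval_cases n; simp [pvRawBits_zero]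
  | succ w ih =>
      intro n hn
      rcases n with _ | m
      · simp [pvRawBits_zero]
      · rw [pvRawBits_succ]
        have hdiv : (m+1)/2 < 2 ^ w :=
          (Nat.div_lt_iff_lt_mul (by omega)).mpr (by rw [pow_succ] at hn; omega)
        have := ih _ hdiv
        simp; omega

lemma encode_eq_bitsBE (n w : Nat) (h : n < 2 ^ w) :
    encode_binary (n : Int) (w : Int) = bitsBE w n := by
  unfold encode_binary
  rcases Nat.eq_zero_or_pos w with hw | hw
  · subst hw
    have : n = 0 := by omega
    subst this
    simp [bitsBE]
  · rw [if_neg (by exact_mod_cast (by omega : (w:Int) ≠ 0)), bitsBE_eq_pad w n h]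
    simp only [Int.toNat_natCast]
    rcases Nat.eq_zero_or_pos n with hn | hn
    · subst hn
      rw [pvRawBits_zero, show pvBin 0 = ['0'] from rfl]
      have h1 : ((w : Int) - ((([ '0' ] : List Char).length : Nat) : Int)).toNat = w - 1 := by
        simp
      rw [h1,
        show (List.replicate (w - 1) '0' ++ ['0'] : List Char)
            = List.replicate ((w-1)+1) '0' from (List.replicate_succ' ..).symm]
      have h2 : (w - 1) + 1 = w - ([] : List Char).length := by simp; omega
      rw [h2, List.append_nil]
    · rw [show pvBin n = pvRawBits n from by unfold pvBin; rw [if_neg (by omega)]]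
      have hle : (pvRawBits n).length ≤ w := rawbits_len_le w n h
      have hcast : ((w:Int) - (((pvRawBits n).length : Nat) : Int)).toNat
          = w - (pvRawBits n).length := by omega
      rw [hcast]

lemma bitsBE_append : ∀ (mw lw x y : Nat), y < 2 ^ mw →
    bitsBE (lw + mw) (x * 2 ^ mw + y) = bitsBE lw x ++ bitsBE mw y := by
  intro mw
  induction mw with
  | zero =>
      intro lw x y hy
      have : y = 0 := by omega
      subst this
      simp [bitsBE]
  | succ mw ih =>
      intro lw x y hy
      have hL : lw + (mw + 1) = (lw + mw) + 1 := by omega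
      rw [hL, bitsBE, bitsBE]
      have hdiv : (x * 2 ^ (mw+1) + y) / 2 = x * 2 ^ mw + y / 2 := by
        rw [show x * 2 ^ (mw+1) + y = y + x * 2 ^ mw * 2 from by ring,
            Nat.add_mul_div_right _ _ (by omega : 0 < 2)]
        omega
      have hmod : (x * 2 ^ (mw+1) + y) % 2 = y % 2 := by
        rw [show x * 2 ^ (mw+1) + y = y + x * 2 ^ mw * 2 from by ring]
        simp [Nat.add_mul_mod_self_right]
      rw [hdiv, hmod, ih lw x (y/2)
        (by rw [pow_succ] at hy; omega)]
      simp

-- ===== VERDICT (by name: the statement is the Claim_ definition above) =====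
theorem frac_to_bits_spec : Claim_equal_frac_to_bits := by
  intro M k l hdom hpre
  obtain ⟨hk, hl0, hlk, hM0, hbound⟩ := hpre
  show frac_to_bits M k l = frac_to_bits_alt M k l
  by_cases hlk' : l = k
  · subst hlk'
    simp [frac_to_bits, frac_to_bits_alt, encode_binary]
  · by_cases hl : l = 0
    · subst hl
      simp [frac_to_bits, frac_to_bits_alt, hlk', encode_binary]
    · -- 0 < l < k: the two-part encoding equals the single k-bit encoding of N = M + M//Zb
      have hllt : l < k := lt_of_le_of_ne hlk hlk'
      have hbound' : M < 2 ^ k.toNat - 2 ^ l.toNat := by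
        rcases hbound with h | ⟨_, h2, _⟩
        · simpa [hllt] using h
        · exact absurd h2 hl
      obtain ⟨L, hLe⟩ : ∃ L : ℕ, l = (L : Int) := ⟨l.toNat, by omega⟩
      obtain ⟨KL, hKLe⟩ : ∃ KL : ℕ, k - l = (KL : Int) := ⟨(k - l).toNat, by omega⟩
      obtain ⟨m, hMe⟩ : ∃ m : ℕ, M = (m : Int) := ⟨M.toNat, by omega⟩
      have hLpos : 1 ≤ L := by omega
      have hKLpos : 1 ≤ KL := by omega
      have hkt : k.toNat = L + KL := by omega
      have hklt : (k - l).toNat = KL := by omega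
      have hlt : l.toNat = L := by omega
      have c1 : (((2:ℕ) ^ (L + KL) : ℕ) : Int) = (2:Int) ^ (L + KL) := by push_cast; ring
      have c2 : (((2:ℕ) ^ L : ℕ) : Int) = (2:Int) ^ L := by push_cast; ring
      have c3 : (((2:ℕ) ^ KL : ℕ) : Int) = (2:Int) ^ KL := by push_cast; ring
      have h2KL : 2 ≤ 2 ^ KL := by
        calc (2:ℕ) = 2 ^ 1 := by norm_num
          _ ≤ 2 ^ KL := Nat.pow_le_pow_right (by norm_num) hKLpos
      have hpadd : (2:ℕ) ^ L * 2 ^ KL = 2 ^ (L + KL) := (pow_add 2 L KL).symm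
      have hmN : m < 2 ^ (L + KL) - 2 ^ L := by
        rw [hkt, hlt] at hbound'
        omega
      set zb : ℕ := 2 ^ KL - 1 with hzb
      have hzbpos : 0 < zb := by omega
      have hZb : (2:Int) ^ KL - 1 = (zb : Int) := by rw [hzb]; omega
      have hx : PySem.Int.floordiv M ((2:Int) ^ KL - 1) = ((m / zb : ℕ) : Int) := by
        rw [hMe, hZb]
        exact_mod_cast PySem.Int.floordiv_natCast m zb
      set q := m / zb with hq
      set r := m % zb with hr
      have hdm : zb * q + r = m := Nat.div_add_mod m zb
      have hfac : 2 ^ L * zb = 2 ^ (L + KL) - 2 ^ L := by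
        rw [hzb, Nat.mul_sub, mul_one, hpadd]
      have hxlt : q < 2 ^ L := (Nat.div_lt_iff_lt_mul hzbpos).mpr (by omega)
      have hylt : r < 2 ^ KL := lt_of_lt_of_le (Nat.mod_lt m hzbpos) (by omega)
      have hzq : ((zb * q : ℕ) : Int) = (zb : Int) * (q : ℕ) := by push_cast; ring
      have hy : M - ((2:Int) ^ KL - 1) * ((q : ℕ) : Int) = ((r : ℕ) : Int) := by
        rw [hMe, hZb]
        omega
      have hqmul : zb * q + q = 2 ^ KL * q := by
        have e1 : zb * q = 2 ^ KL * q - q := by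
          rw [hzb, Nat.sub_mul, one_mul]
        have e2 : q ≤ 2 ^ KL * q := Nat.le_mul_of_pos_left q (by omega)
        omega
      have hqc : ((2 ^ KL * q : ℕ) : Int) = ((q : ℕ) : Int) * (2:Int) ^ KL := by
        push_cast; ring
      have hN : M + ((q : ℕ) : Int) = ((q * 2 ^ KL + r : ℕ) : Int) := by
        rw [hMe]
        have : q * 2 ^ KL = 2 ^ KL * q := Nat.mul_comm _ _
        omega
      have hNlt : q * 2 ^ KL + r < 2 ^ (L + KL) := by
        have e1 : q * 2 ^ KL ≤ (2 ^ L - 1) * 2 ^ KL :=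
          Nat.mul_le_mul_right _ (by omega)
        have e2 : (2 ^ L - 1) * 2 ^ KL = 2 ^ (L + KL) - 2 ^ KL := by
          rw [Nat.sub_mul, one_mul, hpadd]
        omega
      have hkcast : k = ((L + KL : ℕ) : Int) := by push_cast; omega
      simp only [frac_to_bits, frac_to_bits_alt, if_neg hlk', if_neg hl,
        if_neg (show ¬(l = 0 ∨ l = k) from by tauto), hklt]
      rw [hx, hy, hN, hKLe, hLe, hkcast,
        encode_eq_bitsBE q L hxlt, encode_eq_bitsBE r KL hylt,
        encode_eq_bitsBE (q * 2 ^ KL + r) (L + KL) hNlt,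
        bitsBE_append KL L q r hylt, List.map_append]
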